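-- pv_equiv track=rewrite | github.com/je-clark/strang | strang_helpers.py | extract_char_bits
-- ===== SOURCE A (Python) =====
-- def extract_char_bits(strang):
--     char_bits = []
--     for character in strang:
--         c = ord(character)
--         char_bits.append(
--             (
--                 (c & 128) >> 7,
--                 (c & 64) >> 6,
--                 (c & 32) >> 5,
--                 (c & 16) >> 4,
--                 (c & 8) >> 3,
--                 (c & 4) >> 2,
--                 (c & 2) >> 1,
--                 (c & 1)
--             )
--         )
--     return tuple(char_bits)
-- ===== SOURCE B (Python) =====
-- def extract_char_bits(strang):
--     return tuple(
--         tuple(int(b) for b in format(ord(ch) & 255, '08b'))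
--         for ch in strang
--     )
-- ===== Notes on version B (the rewrite author's own statement) =====
-- stated objective: idiomatic
-- what changed: B replaces A's eight hand-unrolled mask-and-shift expressions per character with 8-digit binary string formatting of the low byte, converting each digit character to an int, in a single generator expression instead of an explicit append loop.
import Mathlib
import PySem

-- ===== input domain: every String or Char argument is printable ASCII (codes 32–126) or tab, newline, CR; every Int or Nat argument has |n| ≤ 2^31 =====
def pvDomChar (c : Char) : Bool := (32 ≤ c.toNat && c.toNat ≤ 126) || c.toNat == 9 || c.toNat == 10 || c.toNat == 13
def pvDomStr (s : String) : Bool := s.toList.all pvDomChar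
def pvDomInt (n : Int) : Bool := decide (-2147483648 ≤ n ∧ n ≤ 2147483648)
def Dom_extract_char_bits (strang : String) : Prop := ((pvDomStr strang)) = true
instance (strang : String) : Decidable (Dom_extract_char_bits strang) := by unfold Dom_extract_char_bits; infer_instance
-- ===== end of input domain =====

-- B replaces A's unrolled mask-and-shift bit extraction with binary-string-style digit extraction (divmod by 2, MSB-first) per character; idiomatic, same cost.


-- ===== PORT A =====
-- literal transliteration: append loop, eight mask-and-shift expressions per character
def extract_char_bits (strang : String) : List (List Int) :=
  strang.toList.foldl
    (fun char_bits character =>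
      let c : Nat := character.toNat
      char_bits ++ [[(Int.ofNat ((c &&& 128) >>> 7)),
                     (Int.ofNat ((c &&& 64) >>> 6)),
                     (Int.ofNat ((c &&& 32) >>> 5)),
                     (Int.ofNat ((c &&& 16) >>> 4)),
                     (Int.ofNat ((c &&& 8) >>> 3)),
                     (Int.ofNat ((c &&& 4) >>> 2)),
                     (Int.ofNat ((c &&& 2) >>> 1)),
                     (Int.ofNat (c &&& 1))]])
    []

-- ===== PORT B =====
-- format(n, '08b') digit extraction: 8 divmod-by-2 steps, digits accumulated MSB-first
def pvBin8Go : Nat → Nat → List Int → List Int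
  | 0, _, acc => acc
  | k + 1, m, acc => pvBin8Go k (m / 2) (Int.ofNat (m % 2) :: acc)

def pvBin8 (n : Nat) : List Int := pvBin8Go 8 n []

def extract_char_bits_alt (strang : String) : List (List Int) :=
  strang.toList.map (fun ch => pvBin8 (ch.toNat &&& 255))

-- ===== PRECONDITION & SPEC =====
def Spec_extract_char_bits (strang : String) (out : List (List Int)) : Prop := out = extract_char_bits_alt strang
instance (strang : String) (out : List (List Int)) : Decidable (Spec_extract_char_bits strang out) := by unfold Spec_extract_char_bits; infer_instance

-- ===== CLAIM (what is proved, stated in full; the proofs are below) =====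
def Claim_equal_extract_char_bits : Prop := ∀ (strang : String), Dom_extract_char_bits strang → Spec_extract_char_bits strang (extract_char_bits strang)

-- ===== LEMMAS AND PROOFS =====

-- A's per-character tuple, as a function of the character code
def pvMaskRow (c : Nat) : List Int :=
  [(Int.ofNat ((c &&& 128) >>> 7)),
   (Int.ofNat ((c &&& 64) >>> 6)),
   (Int.ofNat ((c &&& 32) >>> 5)),
   (Int.ofNat ((c &&& 16) >>> 4)),
   (Int.ofNat ((c &&& 8) >>> 3)),
   (Int.ofNat ((c &&& 4) >>> 2)),
   (Int.ofNat ((c &&& 2) >>> 1)),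
   (Int.ofNat (c &&& 1))]

theorem pvMaskRow_low : ∀ c : Nat, pvMaskRow c = pvMaskRow (c &&& 255) := by
  intro c
  have h : ∀ k : Nat, (c &&& 255) &&& k = c &&& (255 &&& k) := fun k => Nat.and_assoc c 255 k
  simp only [pvMaskRow, h,
    show (255:Nat) &&& 128 = 128 from rfl, show (255:Nat) &&& 64 = 64 from rfl,
    show (255:Nat) &&& 32 = 32 from rfl, show (255:Nat) &&& 16 = 16 from rfl,
    show (255:Nat) &&& 8 = 8 from rfl, show (255:Nat) &&& 4 = 4 from rfl,
    show (255:Nat) &&& 2 = 2 from rfl, show (255:Nat) &&& 1 = 1 from rfl]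

set_option maxRecDepth 10000 in
theorem pvRow_eq_small : ∀ m : Nat, m < 256 → pvMaskRow m = pvBin8 m := by decide

theorem pvRow_eq : ∀ c : Nat, pvMaskRow c = pvBin8 (c &&& 255) := by
  intro c
  rw [pvMaskRow_low]
  exact pvRow_eq_small _ (by
    have : c &&& 255 ≤ 255 := Nat.and_le_right
    omega)

theorem pvFoldl_map (l : List Char) :
    ∀ acc : List (List Int),
      l.foldl (fun char_bits character => char_bits ++ [pvMaskRow character.toNat]) acc
        = acc ++ l.map (fun ch => pvBin8 (ch.toNat &&& 255)) := by
  induction l with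
  | nil => intro acc; simp
  | cons ch t ih =>
      intro acc
      rw [List.foldl_cons, ih]
      simp [pvRow_eq]

-- ===== VERDICT (by name: the statement is the Claim_ definition above) =====
theorem extract_char_bits_spec : Claim_equal_extract_char_bits := by
  intro strang _
  show extract_char_bits strang = extract_char_bits_alt strang
  have := pvFoldl_map strang.toList []
  simpa [extract_char_bits, extract_char_bits_alt, pvMaskRow] using this
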